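-- pv_equiv track=rewrite | github.com/langprocgroup/codingobjectives | codesynergy3.py | hadamard_code
-- ===== SOURCE A (Python) =====
-- import itertools
--
-- def hadamard_code(x):
--     n = len(x)
--     masks = itertools.product((0,1), repeat=n)
--     def gen():
--         for mask in masks:
--             bits = [x for x, m in zip(x, mask) if m]
--             yield parity(bits)
--     return tuple(gen())
--
-- def parity(bits):
--     return sum(map(int, bits)) % 2
-- ===== SOURCE B (Python) =====
-- def hadamard_code(x):
--     res = [0]
--     for e in reversed(x):
--         res = res + [(r + e) % 2 for r in res]
--     return tuple(res)
-- ===== Notes on version B (the rewrite author's own statement) =====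
-- stated objective: faster
-- what changed: Replaces the per-mask subset enumeration (every mask re-sums its selected bits) with recursive doubling: fold over the input back-to-front with result := result ++ [(r+e)%2 for r in result], so each of the 2^n outputs costs O(1); intended as faster (O(2^n) vs O(n*2^n)) - measured 18.9x at n=16, at n=64 neither finishes since the output itself has 2^n entries.
import Mathlib
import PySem

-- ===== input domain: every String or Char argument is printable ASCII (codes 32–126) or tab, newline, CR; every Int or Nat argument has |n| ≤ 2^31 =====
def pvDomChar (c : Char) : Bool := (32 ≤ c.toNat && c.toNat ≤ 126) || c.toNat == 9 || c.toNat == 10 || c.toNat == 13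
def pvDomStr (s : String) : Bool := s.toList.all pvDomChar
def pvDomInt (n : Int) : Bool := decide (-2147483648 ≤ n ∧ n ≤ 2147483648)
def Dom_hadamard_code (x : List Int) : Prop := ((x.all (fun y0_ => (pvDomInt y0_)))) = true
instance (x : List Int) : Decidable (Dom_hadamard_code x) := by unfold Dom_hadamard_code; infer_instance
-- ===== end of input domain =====

-- B computes the same tuple by recursive doubling over the input instead of enumerating all 2^n masks; intended as faster (measured 18.9x at n=16; at n=64 neither finishes, the output itself has 2^n entries).

-- ===== PORT A =====
-- itertools.product((0,1), repeat=n), lexicographic (last coordinate fastest)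
def pvProd01 : Nat → List (List Int)
  | 0 => [[]]
  | n+1 => ([0, 1] : List Int).flatMap (fun b => (pvProd01 n).map (fun t => b :: t))

-- parity(bits) = sum(map(int, bits)) % 2  (int on an int is the identity)
def pvParity (bits : List Int) : Int := PySem.Int.mod bits.sum 2

def hadamard_code (x : List Int) : List Int :=
  (pvProd01 x.length).map (fun mask =>
    pvParity (((x.zip mask).filter (fun p => p.2 != 0)).map Prod.fst))

-- ===== PORT B =====
def hadamard_code_alt (x : List Int) : List Int :=
  x.reverse.foldl (fun res e => res ++ res.map (fun r => PySem.Int.mod (r + e) 2)) [0]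

-- ===== PRECONDITION & SPEC =====
def Spec_hadamard_code (x : List Int) (out : List Int) : Prop := out = hadamard_code_alt x
instance (x : List Int) (out : List Int) : Decidable (Spec_hadamard_code x out) := by unfold Spec_hadamard_code; infer_instance

-- ===== CLAIM (what is proved, stated in full; the proofs are below) =====
def Claim_equal_hadamard_code : Prop := ∀ (x : List Int), Dom_hadamard_code x → Spec_hadamard_code x (hadamard_code x)

-- ===== LEMMAS AND PROOFS =====

lemma pvParity_cons (e : Int) (L : List Int) :
    pvParity (e :: L) = (pvParity L + e) % 2 := by
  simp only [pvParity, List.sum_cons, PySem.Int.mod_eq_emod_of_pos (show (0:Int) < 2 by norm_num)]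
  omega

lemma hc_cons (e : Int) (xs : List Int) :
    hadamard_code (e :: xs) =
      hadamard_code xs ++ (hadamard_code xs).map (fun r => PySem.Int.mod (r + e) 2) := by
  simp only [hadamard_code, List.length_cons, pvProd01, List.flatMap_cons, List.flatMap_nil,
    List.append_nil, List.map_append, List.map_map]
  refine congrArg₂ (· ++ ·) ?_ ?_
  · apply List.map_congr_left
    intro t _
    simp [List.zip_cons_cons]
  · apply List.map_congr_left
    intro t _
    simp only [Function.comp, List.zip_cons_cons, List.filter_cons]
    norm_num
    exact pvParity_cons e _

lemma hc_alt_cons (e : Int) (xs : List Int) :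
    hadamard_code_alt (e :: xs) =
      hadamard_code_alt xs ++ (hadamard_code_alt xs).map (fun r => PySem.Int.mod (r + e) 2) := by
  simp [hadamard_code_alt, List.foldl_reverse]

lemma hc_eq (x : List Int) : hadamard_code x = hadamard_code_alt x := by
  induction x with
  | nil => decide
  | cons e xs ih => rw [hc_cons, hc_alt_cons, ih]

-- ===== VERDICT (by name: the statement is the Claim_ definition above) =====
theorem hadamard_code_spec : Claim_equal_hadamard_code := by
  intro x _
  unfold Spec_hadamard_code
  exact hc_eq x
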